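-- pv_equiv track=rewrite | github.com/Jmarquez1511/EN.602.602-DataStructures | EN605202_Lab3_JoseMarquezJaramillo/SourceCode/output.py | addfrequencies
-- ===== SOURCE A (Python) =====
-- def addfrequencies(expressions,frequencies):
--     temp_freq = {}
--     added = []
--     for line in expressions:
--         for char in expressions[line]['frequencies']:
--             if char in temp_freq:
--                 temp_freq[char] += expressions[line]['frequencies'][char]
--             else:
--                 temp_freq[char] = expressions[line]['frequencies'][char]
--
--     for char in temp_freq:
--         if char not in frequencies:
--             frequencies[char] = temp_freq[char]
--             added.append(char)
--     return frequencies, added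
-- ===== SOURCE B (Python) =====
-- def addfrequencies(expressions, frequencies):
--     # Single fused pass: snapshot the original keys, then merge every
--     # 'frequencies' sub-dict straight into `frequencies`, skipping original keys.
--     original = set(frequencies)
--     added = []
--     for entry in expressions.values():
--         for char, count in entry['frequencies'].items():
--             if char in original:
--                 continue
--             if char in frequencies:
--                 frequencies[char] += count
--             else:
--                 frequencies[char] = count
--                 added.append(char)
--     return frequencies, added
-- ===== Notes on version B (the rewrite author's own statement) =====
-- stated objective: simpler
-- what changed: B replaces A's two-phase scheme (aggregate all counts into temp_freq, then merge temp_freq into frequencies) with one fused pass that merges each 'frequencies' sub-dict straight into frequencies, skipping a snapshot of the original keys; the temp_freq dict and the second loop disappear.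
import Mathlib
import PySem

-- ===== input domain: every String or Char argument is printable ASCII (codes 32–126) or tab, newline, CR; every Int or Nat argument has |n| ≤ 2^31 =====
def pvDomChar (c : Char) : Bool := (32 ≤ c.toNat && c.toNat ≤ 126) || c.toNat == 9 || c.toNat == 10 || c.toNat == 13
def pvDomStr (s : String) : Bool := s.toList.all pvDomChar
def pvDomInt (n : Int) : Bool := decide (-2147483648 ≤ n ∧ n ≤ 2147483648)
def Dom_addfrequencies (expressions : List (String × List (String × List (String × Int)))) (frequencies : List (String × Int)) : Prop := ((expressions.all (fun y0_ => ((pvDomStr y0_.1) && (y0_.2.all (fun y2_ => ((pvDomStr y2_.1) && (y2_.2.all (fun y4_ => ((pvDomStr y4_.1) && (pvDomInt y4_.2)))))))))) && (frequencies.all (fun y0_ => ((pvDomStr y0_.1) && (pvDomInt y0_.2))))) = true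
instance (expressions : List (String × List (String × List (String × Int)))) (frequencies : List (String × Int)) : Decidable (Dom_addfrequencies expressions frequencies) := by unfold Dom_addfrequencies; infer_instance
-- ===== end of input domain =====

-- B fuses A's two phases (temp_freq aggregation, then merge) into one pass that merges straight
-- into `frequencies`, skipping a snapshot of its original keys (objective: simpler decomposition).
-- Python A and B both mutate `frequencies` in place identically; the equivalence here is about the return value.

-- ===== PORT A =====
def addfrequencies (expressions : List (String × List (String × List (String × Int)))) (frequencies : List (String × Int)) : (List (String × Int)) × List String :=
  let expD : PySem.Dict String (List (String × List (String × Int))) := PySem.Dict.mk expressions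
  -- temp_freq = {}; for line in expressions: for char in expressions[line]['frequencies']: ...
  -- (the ['frequencies'] lookup is ported with getD []; Pre_ excludes the KeyError case where the key is absent)
  let temp_freq : PySem.Dict String Int :=
    expD.keys.foldl (fun tf line =>
      let inner : PySem.Dict String Int :=
        PySem.Dict.mk ((PySem.Dict.mk (expD.getD line [])).getD "frequencies" [])
      inner.keys.foldl (fun tf char =>
        if tf.contains char then
          tf.insert char (tf.getD char 0 + inner.getD char 0)
        else
          tf.insert char (inner.getD char 0)) tf)
      PySem.Dict.empty
  -- for char in temp_freq: if char not in frequencies: frequencies[char] = temp_freq[char]; added.append(char)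
  let res : PySem.Dict String Int × List String :=
    temp_freq.keys.foldl (fun st char =>
      if st.1.contains char then st
      else (st.1.insert char (temp_freq.getD char 0), st.2 ++ [char]))
      (PySem.Dict.mk frequencies, [])
  (res.1.items, res.2)

-- ===== PORT B =====
def addfrequencies_alt (expressions : List (String × List (String × List (String × Int)))) (frequencies : List (String × Int)) : (List (String × Int)) × List String :=
  let freqD : PySem.Dict String Int := PySem.Dict.mk frequencies
  -- original = set(frequencies)
  let original : PySem.Set String := PySem.Set.ofList freqD.keys
  -- for entry in expressions.values(): for char, count in entry['frequencies'].items(): ...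
  let res : PySem.Dict String Int × List String :=
    (PySem.Dict.mk expressions).values.foldl (fun st entry =>
      let counts : PySem.Dict String Int :=
        PySem.Dict.mk ((PySem.Dict.mk entry).getD "frequencies" [])
      counts.items.foldl (fun (st : PySem.Dict String Int × List String) p =>
        if PySem.Set.contains original p.1 then st
        else if st.1.contains p.1 then
          (st.1.insert p.1 (st.1.getD p.1 0 + p.2), st.2)
        else
          (st.1.insert p.1 p.2, st.2 ++ [p.1])) st)
      (freqD, [])
  (res.1.items, res.2)

-- ===== PRECONDITION & SPEC =====
-- The dict arguments are association lists: Pre_ excludes lists with duplicate keys (no Python dict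
-- corresponds to them — CPython dicts have unique keys) and expression entries lacking a
-- "frequencies" key, on which Python A raises KeyError.
def Pre_addfrequencies (expressions : List (String × List (String × List (String × Int)))) (frequencies : List (String × Int)) : Prop :=
  (expressions.map Prod.fst).Nodup ∧ (frequencies.map Prod.fst).Nodup ∧
  ∀ e ∈ expressions, (e.2.map Prod.fst).Nodup ∧ "frequencies" ∈ e.2.map Prod.fst ∧
    ∀ q ∈ e.2, (q.2.map Prod.fst).Nodup
instance (expressions : List (String × List (String × List (String × Int)))) (frequencies : List (String × Int)) : Decidable (Pre_addfrequencies expressions frequencies) := by unfold Pre_addfrequencies; infer_instance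

def pvWitness_addfrequencies : (List (String × List (String × List (String × Int)))) × (List (String × Int)) :=
  ([("e1", [("frequencies", [("a", 2), ("b", 1)])]), ("e2", [("frequencies", [("b", 3), ("c", 4)])])], [("b", 7)])

def Spec_addfrequencies (expressions : List (String × List (String × List (String × Int)))) (frequencies : List (String × Int)) (out : (List (String × Int)) × List String) : Prop := out = addfrequencies_alt expressions frequencies
instance (expressions : List (String × List (String × List (String × Int)))) (frequencies : List (String × Int)) (out : (List (String × Int)) × List String) : Decidable (Spec_addfrequencies expressions frequencies out) := by unfold Spec_addfrequencies; infer_instance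

-- ===== CLAIM (what is proved, stated in full; the proofs are below) =====
def Claim_equal_addfrequencies : Prop := ∀ (expressions : List (String × List (String × List (String × Int)))) (frequencies : List (String × Int)), Dom_addfrequencies expressions frequencies → Pre_addfrequencies expressions frequencies → Spec_addfrequencies expressions frequencies (addfrequencies expressions frequencies)

-- ===== LEMMAS AND PROOFS =====

def pvIns (d : PySem.Dict String Int) (p : String × Int) : PySem.Dict String Int :=
  d.insert p.1 (d.getD p.1 0 + p.2)

-- A's aggregation branch equals pvIns
theorem pv_stepA_eq (d : PySem.Dict String Int) (p : String × Int) :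
    (if d.contains p.1 then d.insert p.1 (d.getD p.1 0 + p.2) else d.insert p.1 p.2) = pvIns d p := by
  cases hc : d.contains p.1 with
  | true => simp [pvIns]
  | false => simp [pvIns, PySem.Dict.getD_of_not_contains d 0 hc]

-- a fold over a dict's keys that looks each key up is a fold over its items
theorem pv_foldl_keys_getD {ν α : Type} (d : PySem.Dict String ν) (hnd : d.keys.Nodup) (dflt : ν)
    (f : α → String × ν → α) (i : α) :
    d.keys.foldl (fun a k => f a (k, d.getD k dflt)) i = d.items.foldl f i := by
  rw [PySem.Dict.items_eq_map_keys d hnd dflt, List.foldl_map]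

-- first-match lookup across an appended association list
theorem pv_get?_mk_append (xs ys : List (String × Int)) (k : String) :
    (PySem.Dict.mk (xs ++ ys)).get? k = ((PySem.Dict.mk xs).get? k).or ((PySem.Dict.mk ys).get? k) := by
  induction xs with
  | nil => simp [PySem.Dict.get?]  -- guess; fix
  | cons a xs ih =>
      rw [List.cons_append, PySem.Dict.get?_mk_cons, PySem.Dict.get?_mk_cons]
      cases h : a.1 == k <;> simp [ih]

theorem pv_contains_mk_append (xs ys : List (String × Int)) (k : String) :
    (PySem.Dict.mk (xs ++ ys)).contains k = ((PySem.Dict.mk xs).contains k || (PySem.Dict.mk ys).contains k) := by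
  rw [PySem.Dict.contains_eq_isSome_get?, PySem.Dict.contains_eq_isSome_get?,
    PySem.Dict.contains_eq_isSome_get?, pv_get?_mk_append]
  cases (PySem.Dict.mk xs).get? k <;> simp

theorem pv_getD_mk_append_miss (xs ys : List (String × Int)) (k : String)
    (h : (PySem.Dict.mk xs).contains k = false) :
    (PySem.Dict.mk (xs ++ ys)).getD k 0 = (PySem.Dict.mk ys).getD k 0 := by
  rw [PySem.Dict.getD_eq_get?_getD, PySem.Dict.getD_eq_get?_getD, pv_get?_mk_append,
    (PySem.Dict.get?_eq_none_iff_contains _ _).mpr h, Option.none_or]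

-- inserting a key absent from the left part of an appended association list
theorem pv_items_insert_mk_append (xs ys : List (String × Int)) (k : String) (v : Int)
    (h : (PySem.Dict.mk xs).contains k = false) :
    ((PySem.Dict.mk (xs ++ ys)).insert k v).items = xs ++ ((PySem.Dict.mk ys).insert k v).items := by
  have hxk : ∀ p ∈ xs, (p.1 == k) = false := by
    intro p hp
    by_contra hne
    have : p.1 = k := by simpa using (Bool.not_eq_false _).mp hne
    have : (PySem.Dict.mk xs).contains k = true := by
      rw [PySem.Dict.contains_eq_decide_mem_keys]
      have hk : k ∈ (PySem.Dict.mk xs).keys := by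
        show k ∈ xs.map Prod.fst
        exact List.mem_map.mpr ⟨p, hp, this⟩
      simpa using hk
    simp [this] at h
  cases hc : (PySem.Dict.mk ys).contains k with
  | true =>
      have hall : (PySem.Dict.mk (xs ++ ys)).contains k = true := by
        rw [pv_contains_mk_append, hc]; simp
      rw [PySem.Dict.items_insert_of_contains _ _ hall, PySem.Dict.items_insert_of_contains _ _ hc]
      show (xs ++ ys).map _ = xs ++ ys.map _
      rw [List.map_append]
      congr 1
      conv_rhs => rw [← List.map_id xs]
      exact List.map_congr_left (fun p hp => by simp [hxk p hp])
  | false =>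
      have hall : (PySem.Dict.mk (xs ++ ys)).contains k = false := by
        rw [pv_contains_mk_append, h, hc]; rfl
      rw [PySem.Dict.items_insert_of_not_contains _ _ hall, PySem.Dict.items_insert_of_not_contains _ _ hc]
      show (xs ++ ys) ++ [(k, v)] = xs ++ (ys ++ [(k, v)])
      simp

-- lookup of a key the filter keeps is unchanged by filtering
theorem pv_get?_mk_filter (l : List (String × Int)) (P : String → Bool) (k : String) (hk : P k = true) :
    (PySem.Dict.mk (l.filter (fun p => P p.1))).get? k = (PySem.Dict.mk l).get? k := by
  induction l with
  | nil => rfl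
  | cons a l ih =>
      cases hP : P a.1 with
      | true =>
          rw [List.filter_cons_of_pos (by simpa using hP), PySem.Dict.get?_mk_cons,
            PySem.Dict.get?_mk_cons, ih]
      | false =>
          have hne : (a.1 == k) = false := by
            by_contra hne
            have : a.1 = k := by simpa using (Bool.not_eq_false _).mp hne
            rw [this, hk] at hP; cases hP
          rw [List.filter_cons_of_neg (by simp [hP]), PySem.Dict.get?_mk_cons, hne, ih]
          rfl

theorem pv_contains_mk_filter (l : List (String × Int)) (P : String → Bool) (k : String) (hk : P k = true) :
    (PySem.Dict.mk (l.filter (fun p => P p.1))).contains k = (PySem.Dict.mk l).contains k := by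
  rw [PySem.Dict.contains_eq_isSome_get?, PySem.Dict.contains_eq_isSome_get?, pv_get?_mk_filter l P k hk]

theorem pv_filter_pvIns_pos (d : PySem.Dict String Int) (p : String × Int) (P : String → Bool)
    (hP : P p.1 = true) :
    (pvIns d p).items.filter (fun q => P q.1)
      = (pvIns (PySem.Dict.mk (d.items.filter (fun q => P q.1))) p).items := by
  have hgd : (PySem.Dict.mk (d.items.filter (fun q => P q.1))).getD p.1 0 = d.getD p.1 0 := by
    rw [PySem.Dict.getD_eq_get?_getD, PySem.Dict.getD_eq_get?_getD, pv_get?_mk_filter _ P _ hP]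
  have hcd : (PySem.Dict.mk (d.items.filter (fun q => P q.1))).contains p.1 = d.contains p.1 :=
    pv_contains_mk_filter _ P _ hP
  cases hc : d.contains p.1 with
  | true =>
      rw [pvIns, pvIns, PySem.Dict.items_insert_of_contains _ _ hc,
        PySem.Dict.items_insert_of_contains _ _ (hcd.trans hc), hgd]
      show (d.items.map (fun q => if (q.1 == p.1) = true then (p.1, d.getD p.1 0 + p.2) else q)).filter _ = _
      rw [List.filter_map]
      have : ((fun q => P q.1) ∘ (fun q => if (q.1 == p.1) = true then (p.1, d.getD p.1 0 + p.2) else q))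
          = fun (q : String × Int) => P q.1 := by
        funext q
        by_cases h : q.1 = p.1 <;> simp [h, hP]
      rw [this]
  | false =>
      rw [pvIns, pvIns, PySem.Dict.items_insert_of_not_contains _ _ hc,
        PySem.Dict.items_insert_of_not_contains _ _ (hcd.trans hc), hgd, List.filter_append]
      simp [hP]

theorem pv_filter_pvIns_neg (d : PySem.Dict String Int) (p : String × Int) (P : String → Bool)
    (hP : P p.1 = false) :
    (pvIns d p).items.filter (fun q => P q.1) = d.items.filter (fun q => P q.1) := by
  cases hc : d.contains p.1 with
  | true =>
      rw [pvIns, PySem.Dict.items_insert_of_contains _ _ hc, List.filter_map]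
      have : ((fun q => P q.1) ∘ (fun q => if (q.1 == p.1) = true then (p.1, d.getD p.1 0 + p.2) else q))
          = fun (q : String × Int) => P q.1 := by
        funext q
        by_cases h : q.1 = p.1 <;> simp [h, hP]
      rw [this]
      have : ∀ q ∈ d.items.filter (fun (q : String × Int) => P q.1),
          (fun (q : String × Int) => if (q.1 == p.1) = true then (p.1, d.getD p.1 0 + p.2) else q) q = q := by
        intro q hq
        have hq1 : P q.1 = true := by simpa using (List.mem_filter.mp hq).2
        have : (q.1 == p.1) = false := by
          by_contra hne
          have : q.1 = p.1 := by simpa using (Bool.not_eq_false _).mp hne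
          rw [this, hP] at hq1; cases hq1
        simp [this]
      exact (List.map_congr_left this).trans (List.map_id _)
  | false =>
      rw [pvIns, PySem.Dict.items_insert_of_not_contains _ _ hc, List.filter_append]
      simp [hP]

-- key-filtering commutes with the whole aggregation
theorem pv_filter_foldl_pvIns (P : String → Bool) :
    ∀ (L : List (String × Int)) (d : PySem.Dict String Int),
    (L.foldl pvIns d).items.filter (fun q => P q.1)
      = ((L.filter (fun p => P p.1)).foldl pvIns (PySem.Dict.mk (d.items.filter (fun q => P q.1)))).items := by
  intro L
  induction L with
  | nil => intro d; rfl
  | cons p L ih =>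
      intro d
      rw [List.foldl_cons]
      cases hP : P p.1 with
      | true =>
          rw [List.filter_cons_of_pos (by simpa using hP), List.foldl_cons, ih (pvIns d p),
            pv_filter_pvIns_pos d p P hP]
      | false =>
          rw [List.filter_cons_of_neg (by simp [hP]), ih (pvIns d p), pv_filter_pvIns_neg d p P hP]

-- A's second phase, with an already-processed suffix E of fresh pairs
theorem pv_phase2 (F : PySem.Dict String Int) :
    ∀ (l E : List (String × Int)),
    (l.map Prod.fst).Nodup → (∀ p ∈ l, p.1 ∉ E.map Prod.fst) →
    l.foldl (fun st (p : String × Int) =>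
        if st.1.contains p.1 then st else (st.1.insert p.1 p.2, st.2 ++ [p.1]))
      (PySem.Dict.mk (F.items ++ E), E.map Prod.fst)
    = (PySem.Dict.mk (F.items ++ (E ++ l.filter (fun p => !(F.contains p.1)))),
       (E ++ l.filter (fun p => !(F.contains p.1))).map Prod.fst) := by
  intro l
  induction l with
  | nil => intro E _ _; simp
  | cons p l ih =>
      intro E hnd hfresh
      have hpE : (PySem.Dict.mk E).contains p.1 = false := by
        rw [PySem.Dict.contains_eq_decide_mem_keys]
        have : p.1 ∉ E.map Prod.fst := hfresh p (by simp)
        simpa [PySem.Dict.keys] using this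
      have hcontains : (PySem.Dict.mk (F.items ++ E)).contains p.1 = F.contains p.1 := by
        rw [pv_contains_mk_append, hpE]
        show (F.contains p.1 || false) = F.contains p.1
        simp
      rw [List.foldl_cons]
      cases hc : F.contains p.1 with
      | true =>
          rw [if_pos (by rw [hcontains, hc]),
            List.filter_cons_of_neg (by simp [hc]),
            ih E (by simpa using hnd.of_cons) (fun q hq => hfresh q (by simp [hq]))]
      | false =>
          rw [if_neg (by rw [hcontains, hc]; simp)]
          have hstep : ((PySem.Dict.mk (F.items ++ E)).insert p.1 p.2, E.map Prod.fst ++ [p.1])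
              = (PySem.Dict.mk (F.items ++ (E ++ [p])), (E ++ [p]).map Prod.fst) := by
            refine Prod.ext ?_ (by simp)
            apply PySem.Dict.ext
            rw [PySem.Dict.items_insert_of_not_contains _ _ (by rw [hcontains, hc])]
            show (F.items ++ E) ++ [(p.1, p.2)] = F.items ++ (E ++ [p])
            simp
          rw [hstep, ih (E ++ [p]) (by simpa using hnd.of_cons) ?_ ,
            List.filter_cons_of_pos (by simp [hc])]
          · rw [List.append_assoc]; simp
          · intro q hq
            have h1 : q.1 ∉ E.map Prod.fst := hfresh q (by simp [hq])
            have h2 : q.1 ≠ p.1 := by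
              have := hnd
              rw [List.map_cons, List.nodup_cons] at this
              intro he
              exact this.1 (he ▸ List.mem_map.mpr ⟨q, hq, rfl⟩)
            simp [h1, h2]

-- B's fused merge loop over fresh pairs, with the already-built new part G
theorem pv_fusedB (F : PySem.Dict String Int) :
    ∀ (M : List (String × Int)) (G : PySem.Dict String Int),
    (∀ p ∈ M, F.contains p.1 = false) → (∀ k, G.contains k = true → F.contains k = false) →
    M.foldl (fun st (p : String × Int) =>
        if st.1.contains p.1 then (st.1.insert p.1 (st.1.getD p.1 0 + p.2), st.2)
        else (st.1.insert p.1 p.2, st.2 ++ [p.1]))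
      (PySem.Dict.mk (F.items ++ G.items), G.keys)
    = (PySem.Dict.mk (F.items ++ (M.foldl pvIns G).items), (M.foldl pvIns G).keys) := by
  intro M
  induction M with
  | nil => intro G _ _; rfl
  | cons p M ih =>
      intro G hM hG
      have hpF : F.contains p.1 = false := hM p (by simp)
      have hFk : (PySem.Dict.mk F.items).contains p.1 = false := hpF
      have hcontains : (PySem.Dict.mk (F.items ++ G.items)).contains p.1 = G.contains p.1 := by
        rw [pv_contains_mk_append, hFk, Bool.false_or]
      rw [List.foldl_cons, List.foldl_cons]
      cases hc : G.contains p.1 with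
      | true =>
          rw [if_pos (by rw [hcontains, hc])]
          have hgd : (PySem.Dict.mk (F.items ++ G.items)).getD p.1 0 = G.getD p.1 0 :=
            pv_getD_mk_append_miss _ _ _ hFk
          have hstep : ((PySem.Dict.mk (F.items ++ G.items)).insert p.1
                ((PySem.Dict.mk (F.items ++ G.items)).getD p.1 0 + p.2), G.keys)
              = (PySem.Dict.mk (F.items ++ (pvIns G p).items), (pvIns G p).keys) := by
            refine Prod.ext ?_ ?_
            · apply PySem.Dict.ext
              show _ = F.items ++ (pvIns G p).items
              rw [hgd, pv_items_insert_mk_append _ _ _ _ hFk]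
              rfl
            · show G.keys = (pvIns G p).keys
              rw [pvIns, PySem.Dict.keys_insert_of_contains _ _ hc]
          rw [hstep, ih (pvIns G p) (fun q hq => hM q (by simp [hq])) ?_]
          intro k hk
          rw [pvIns, PySem.Dict.contains_insert] at hk
          rcases Bool.or_eq_true_iff.mp hk with h | h
          · have : k = p.1 := by simpa using h
            rw [this]; exact hpF
          · exact hG k h
      | false =>
          rw [if_neg (by rw [hcontains, hc]; simp)]
          have hstep : ((PySem.Dict.mk (F.items ++ G.items)).insert p.1 p.2, G.keys ++ [p.1])
              = (PySem.Dict.mk (F.items ++ (pvIns G p).items), (pvIns G p).keys) := by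
            refine Prod.ext ?_ ?_
            · apply PySem.Dict.ext
              show _ = F.items ++ (pvIns G p).items
              rw [pv_items_insert_mk_append _ _ _ _ hFk]
              show _ ++ (G.insert p.1 p.2).items = _ ++ (G.insert p.1 (G.getD p.1 0 + p.2)).items
              rw [PySem.Dict.getD_of_not_contains _ _ hc, zero_add]
            · show G.keys ++ [p.1] = (pvIns G p).keys
              rw [pvIns, PySem.Dict.keys_insert_of_not_contains _ _ hc]
          rw [hstep, ih (pvIns G p) (fun q hq => hM q (by simp [hq])) ?_]
          intro k hk
          rw [pvIns, PySem.Dict.contains_insert] at hk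
          rcases Bool.or_eq_true_iff.mp hk with h | h
          · have : k = p.1 := by simpa using h
            rw [this]; exact hpF
          · exact hG k h

def pvCs (e : String × List (String × List (String × Int))) : List (String × Int) :=
  (PySem.Dict.mk e.2).getD "frequencies" []

def pvL (expressions : List (String × List (String × List (String × Int)))) : List (String × Int) :=
  expressions.flatMap pvCs

theorem pv_cs_nodup (e : String × List (String × List (String × Int)))
    (h : ∀ q ∈ e.2, (q.2.map Prod.fst).Nodup) : ((pvCs e).map Prod.fst).Nodup := by
  unfold pvCs
  rw [PySem.Dict.getD_eq_get?_getD]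
  cases hq : (PySem.Dict.mk e.2).get? "frequencies" with
  | none => simp
  | some v =>
      have hm : ("frequencies", v) ∈ e.2 := PySem.Dict.mem_items_of_get?_eq_some _ hq
      simpa using h _ hm

theorem pv_T_nodup (L : List (String × Int)) : (L.foldl pvIns PySem.Dict.empty).keys.Nodup :=
  PySem.Dict.nodup_keys_foldl_insert_key L Prod.fst (fun d p => d.getD p.1 0 + p.2)
    PySem.Dict.empty PySem.Dict.nodup_keys_empty

theorem pv_A_eval (expressions : List (String × List (String × List (String × Int))))
    (frequencies : List (String × Int))
    (hne : (expressions.map Prod.fst).Nodup)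
    (hcs : ∀ e ∈ expressions, ((pvCs e).map Prod.fst).Nodup) :
    addfrequencies expressions frequencies
      = (frequencies ++ ((pvL expressions).foldl pvIns PySem.Dict.empty).items.filter
            (fun q => !((PySem.Dict.mk frequencies).contains q.1)),
         (((pvL expressions).foldl pvIns PySem.Dict.empty).items.filter
            (fun q => !((PySem.Dict.mk frequencies).contains q.1))).map Prod.fst) := by
  have hT : (PySem.Dict.mk expressions).keys.foldl (fun tf line =>
        (PySem.Dict.mk ((PySem.Dict.mk ((PySem.Dict.mk expressions).getD line [])).getD "frequencies" [])).keys.foldl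
          (fun tf char =>
            if tf.contains char then
              tf.insert char (tf.getD char 0 +
                (PySem.Dict.mk ((PySem.Dict.mk ((PySem.Dict.mk expressions).getD line [])).getD "frequencies" [])).getD char 0)
            else
              tf.insert char
                ((PySem.Dict.mk ((PySem.Dict.mk ((PySem.Dict.mk expressions).getD line [])).getD "frequencies" [])).getD char 0)) tf)
        PySem.Dict.empty
      = (pvL expressions).foldl pvIns PySem.Dict.empty := by
    rw [pv_foldl_keys_getD (PySem.Dict.mk expressions) hne []
      (fun tf e => (PySem.Dict.mk ((PySem.Dict.mk e.2).getD "frequencies" [])).keys.foldl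
        (fun tf char =>
          if tf.contains char then
            tf.insert char (tf.getD char 0 + (PySem.Dict.mk ((PySem.Dict.mk e.2).getD "frequencies" [])).getD char 0)
          else
            tf.insert char ((PySem.Dict.mk ((PySem.Dict.mk e.2).getD "frequencies" [])).getD char 0)) tf)
      PySem.Dict.empty]
    have hstep : ∀ (tf : PySem.Dict String Int) (e : String × List (String × List (String × Int))),
        e ∈ expressions →
        (PySem.Dict.mk ((PySem.Dict.mk e.2).getD "frequencies" [])).keys.foldl
          (fun tf char =>
            if tf.contains char then
              tf.insert char (tf.getD char 0 + (PySem.Dict.mk ((PySem.Dict.mk e.2).getD "frequencies" [])).getD char 0)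
            else
              tf.insert char ((PySem.Dict.mk ((PySem.Dict.mk e.2).getD "frequencies" [])).getD char 0)) tf
        = (pvCs e).foldl pvIns tf := by
      intro tf e he
      have hfun : (fun (a : PySem.Dict String Int) (p : String × Int) =>
          if a.contains p.1 then a.insert p.1 (a.getD p.1 0 + p.2) else a.insert p.1 p.2) = pvIns :=
        funext fun d => funext fun p => pv_stepA_eq d p
      refine Eq.trans (pv_foldl_keys_getD (PySem.Dict.mk (pvCs e)) (hcs e he) 0
        (fun a (p : String × Int) =>
          if a.contains p.1 then a.insert p.1 (a.getD p.1 0 + p.2) else a.insert p.1 p.2) tf) ?_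
      rw [hfun]
    refine Eq.trans (PySem.List.foldl_congr_mem expressions _
      (fun tf e => (pvCs e).foldl pvIns tf) PySem.Dict.empty
      (fun tf e he => hstep tf e he)) ?_
    rw [pvL, List.flatMap_def, List.foldl_flatten, List.foldl_map]
  have h2 : ((pvL expressions).foldl pvIns PySem.Dict.empty).keys.foldl
      (fun st char =>
        if st.1.contains char then st
        else (st.1.insert char (((pvL expressions).foldl pvIns PySem.Dict.empty).getD char 0), st.2 ++ [char]))
      (PySem.Dict.mk frequencies, [])
      = (PySem.Dict.mk (frequencies ++ ((pvL expressions).foldl pvIns PySem.Dict.empty).items.filter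
            (fun q => !((PySem.Dict.mk frequencies).contains q.1))),
         (((pvL expressions).foldl pvIns PySem.Dict.empty).items.filter
            (fun q => !((PySem.Dict.mk frequencies).contains q.1))).map Prod.fst) := by
    refine Eq.trans (pv_foldl_keys_getD ((pvL expressions).foldl pvIns PySem.Dict.empty)
      (pv_T_nodup _) 0
      (fun st (p : String × Int) =>
        if st.1.contains p.1 then st else (st.1.insert p.1 p.2, st.2 ++ [p.1]))
      (PySem.Dict.mk frequencies, [])) ?_
    have hinit : ((PySem.Dict.mk frequencies : PySem.Dict String Int), ([] : List String))
        = (PySem.Dict.mk ((PySem.Dict.mk frequencies).items ++ []),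
           ([] : List (String × Int)).map Prod.fst) := by simp
    rw [hinit, pv_phase2 (PySem.Dict.mk frequencies)
      ((pvL expressions).foldl pvIns PySem.Dict.empty).items [] (pv_T_nodup _) (by simp)]
    simp
  simp only [addfrequencies]
  rw [hT, h2]

theorem pv_B_eval (expressions : List (String × List (String × List (String × Int))))
    (frequencies : List (String × Int)) :
    addfrequencies_alt expressions frequencies
      = (frequencies ++ (((pvL expressions).filter
            (fun p => !((PySem.Dict.mk frequencies).contains p.1))).foldl pvIns PySem.Dict.empty).items,
         ((((pvL expressions).filter
            (fun p => !((PySem.Dict.mk frequencies).contains p.1))).foldl pvIns PySem.Dict.empty).items).map Prod.fst) := by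
  have hstepfun : (fun (st : PySem.Dict String Int × List String) (p : String × Int) =>
        if PySem.Set.contains (PySem.Set.ofList (PySem.Dict.mk frequencies).keys) p.1 then st
        else if st.1.contains p.1 then (st.1.insert p.1 (st.1.getD p.1 0 + p.2), st.2)
        else (st.1.insert p.1 p.2, st.2 ++ [p.1]))
      = (fun st p =>
        if !((PySem.Dict.mk frequencies).contains p.1) then
          (if st.1.contains p.1 then (st.1.insert p.1 (st.1.getD p.1 0 + p.2), st.2)
           else (st.1.insert p.1 p.2, st.2 ++ [p.1]))
        else st) := by
    funext st p
    have hmem : PySem.Set.contains (PySem.Set.ofList (PySem.Dict.mk frequencies).keys) p.1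
        = (PySem.Dict.mk frequencies).contains p.1 := by
      rw [PySem.Dict.contains_eq_decide_mem_keys]
      simp [PySem.Set.contains]
    rw [hmem]
    cases (PySem.Dict.mk frequencies).contains p.1 <;> simp
  have hB : (pvL expressions).foldl
      (fun (st : PySem.Dict String Int × List String) (p : String × Int) =>
        if PySem.Set.contains (PySem.Set.ofList (PySem.Dict.mk frequencies).keys) p.1 then st
        else if st.1.contains p.1 then (st.1.insert p.1 (st.1.getD p.1 0 + p.2), st.2)
        else (st.1.insert p.1 p.2, st.2 ++ [p.1]))
      (PySem.Dict.mk frequencies, [])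
      = (PySem.Dict.mk (frequencies ++ (((pvL expressions).filter
            (fun p => !((PySem.Dict.mk frequencies).contains p.1))).foldl pvIns PySem.Dict.empty).items),
         (((pvL expressions).filter
            (fun p => !((PySem.Dict.mk frequencies).contains p.1))).foldl pvIns PySem.Dict.empty).keys) := by
    rw [hstepfun, PySem.List.foldl_if_eq_foldl_filter]
    have hinit : ((PySem.Dict.mk frequencies : PySem.Dict String Int), ([] : List String))
        = (PySem.Dict.mk ((PySem.Dict.mk frequencies).items ++ (PySem.Dict.empty : PySem.Dict String Int).items),
           (PySem.Dict.empty : PySem.Dict String Int).keys) := by simp [PySem.Dict.empty]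
    rw [hinit, pv_fusedB (PySem.Dict.mk frequencies) _ PySem.Dict.empty ?_ ?_]
    · intro p hp
      have := (List.mem_filter.mp hp).2
      simpa using this
    · intro k hk
      simp [PySem.Dict.empty, PySem.Dict.contains] at hk
  -- B's outer structure: values + per-entry items folds are the single fold over pvL
  have houter : (PySem.Dict.mk expressions).values.foldl
      (fun (st : PySem.Dict String Int × List String) entry =>
        (PySem.Dict.mk ((PySem.Dict.mk entry).getD "frequencies" [])).items.foldl
          (fun (st : PySem.Dict String Int × List String) (p : String × Int) =>
            if PySem.Set.contains (PySem.Set.ofList (PySem.Dict.mk frequencies).keys) p.1 then st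
            else if st.1.contains p.1 then (st.1.insert p.1 (st.1.getD p.1 0 + p.2), st.2)
            else (st.1.insert p.1 p.2, st.2 ++ [p.1])) st)
      (PySem.Dict.mk frequencies, [])
      = (pvL expressions).foldl
      (fun (st : PySem.Dict String Int × List String) (p : String × Int) =>
        if PySem.Set.contains (PySem.Set.ofList (PySem.Dict.mk frequencies).keys) p.1 then st
        else if st.1.contains p.1 then (st.1.insert p.1 (st.1.getD p.1 0 + p.2), st.2)
        else (st.1.insert p.1 p.2, st.2 ++ [p.1]))
      (PySem.Dict.mk frequencies, []) := by
    show (expressions.map Prod.snd).foldl _ (PySem.Dict.mk frequencies, []) = _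
    rw [List.foldl_map, pvL, List.flatMap_def, List.foldl_flatten, List.foldl_map]
    rfl
  simp only [addfrequencies_alt]
  rw [houter, hB]
  rfl

theorem pv_final (expressions : List (String × List (String × List (String × Int))))
    (frequencies : List (String × Int))
    (hne : (expressions.map Prod.fst).Nodup)
    (hcs : ∀ e ∈ expressions, ((pvCs e).map Prod.fst).Nodup) :
    addfrequencies expressions frequencies = addfrequencies_alt expressions frequencies := by
  rw [pv_A_eval expressions frequencies hne hcs, pv_B_eval expressions frequencies]
  have hS : ((pvL expressions).foldl pvIns PySem.Dict.empty).items.filter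
      (fun q => !((PySem.Dict.mk frequencies).contains q.1))
      = (((pvL expressions).filter
          (fun p => !((PySem.Dict.mk frequencies).contains p.1))).foldl pvIns PySem.Dict.empty).items :=
    pv_filter_foldl_pvIns (fun c => !((PySem.Dict.mk frequencies).contains c)) (pvL expressions) PySem.Dict.empty
  rw [hS]

-- ===== VERDICT (by name: the statement is the Claim_ definition above) =====
theorem addfrequencies_spec : Claim_equal_addfrequencies := by
  intro expressions frequencies _ hpre
  obtain ⟨hne, _hnf, hent⟩ := hpre
  unfold Spec_addfrequencies
  exact pv_final expressions frequencies hne (fun e he => pv_cs_nodup e (hent e he).2.2)
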